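-- pv_equiv track=rewrite | github.com/dimamik/AGH_Algorithms_and_data_structures | Bit_Algo/03_03 Sortowanie i szukanie/zad_2.py | zad
-- ===== SOURCE A (Python) =====
-- def zad(tab):
--     sum = 0
--     curr_el = 0
--     for i in range(len(tab)):
--         if (tab[i] == 0):
--             sum+=2*(i-curr_el)
--             curr_el+=1
--     return sum
-- ===== SOURCE B (Python) =====
-- def zad(tab):
--     # Inversion-counting view: the total movement equals twice the number of
--     # (nonzero, zero) inversions. Sweep the array from the RIGHT, tracking how
--     # many zeros have been seen; every nonzero must jump over all of them.
--     total = 0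
--     zeros = 0
--     for x in reversed(tab):
--         if x == 0:
--             zeros += 1
--         else:
--             total += 2 * zeros
--     return total
-- ===== Notes on version B (the rewrite author's own statement) =====
-- stated objective: alternative
-- what changed: Instead of A's forward index scan charging each zero its distance 2*(i - rank), B counts (nonzero, zero) inversions by a reverse sweep: it walks the list from the right keeping a count of zeros seen and charges each NONZERO element 2*zeros; no indices or ranks are used at all.
import Mathlib
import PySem

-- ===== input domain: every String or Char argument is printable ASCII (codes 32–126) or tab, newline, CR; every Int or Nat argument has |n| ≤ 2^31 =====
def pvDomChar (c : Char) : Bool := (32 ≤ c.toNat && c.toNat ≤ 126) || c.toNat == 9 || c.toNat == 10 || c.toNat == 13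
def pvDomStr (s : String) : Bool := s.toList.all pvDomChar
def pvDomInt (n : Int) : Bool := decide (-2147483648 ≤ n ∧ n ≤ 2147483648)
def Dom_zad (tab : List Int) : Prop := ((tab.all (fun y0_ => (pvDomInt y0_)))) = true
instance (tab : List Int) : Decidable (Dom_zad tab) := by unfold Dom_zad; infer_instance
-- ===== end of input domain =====

-- B replaces A's forward index/rank scan by a reverse sweep counting (nonzero, zero) inversions; same O(n) cost.

-- ===== PORT A =====
-- A: loop over indices, keeping a running sum and the zero-rank counter curr_el.
def zadLoopA : List (Int × Nat) → Int → Int → Int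
  | [], s, _ => s
  | (x, i) :: rest, s, c =>
      if x = 0 then zadLoopA rest (s + 2 * ((i : Int) - c)) (c + 1)
      else zadLoopA rest s c

def zad (tab : List Int) : Int := zadLoopA (tab.zipIdx) 0 0

-- ===== PORT B =====
-- B: sweep the reversed list, counting zeros seen; each nonzero adds 2*zeros.
def zadLoopB : List Int → Int × Int → Int × Int
  | [], tz => tz
  | x :: rest, (t, z) =>
      if x = 0 then zadLoopB rest (t, z + 1)
      else zadLoopB rest (t + 2 * z, z)

def zad_alt (tab : List Int) : Int := (zadLoopB tab.reverse (0, 0)).1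

-- ===== PRECONDITION & SPEC =====
def Spec_zad (tab : List Int) (out : Int) : Prop := out = zad_alt tab
instance (tab : List Int) (out : Int) : Decidable (Spec_zad tab out) := by unfold Spec_zad; infer_instance

-- ===== CLAIM (what is proved, stated in full; the proofs are below) =====
def Claim_equal_zad : Prop := ∀ (tab : List Int), Dom_zad tab → Spec_zad tab (zad tab)

-- ===== LEMMAS AND PROOFS =====

-- #zeros in l, as an Int
def czCount (l : List Int) : Int := ((l.filter (fun x => x = 0)).length : Int)

-- inversion count: pairs (nonzero, later zero), defined structurally
def invJ : List Int → Int
  | [] => 0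
  | x :: r => invJ r + (if x = 0 then 0 else czCount r)

theorem zadLoopA_eq (l : List Int) : ∀ (n : Nat) (s c : Int),
    zadLoopA (l.zipIdx n) s c = s + 2 * invJ l + 2 * ((n : Int) - c) * czCount l := by
  induction l with
  | nil => intro n s c; simp [zadLoopA, invJ, czCount]
  | cons x r ih =>
      intro n s c
      by_cases hx : x = 0
      · subst hx
        simp only [List.zipIdx_cons, zadLoopA, if_true, ih, invJ, czCount,
          List.filter_cons, decide_true, List.length_cons]
        push_cast
        ring
      · simp only [List.zipIdx_cons, zadLoopA, if_neg hx, ih, invJ, czCount,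
          List.filter_cons]
        simp only [decide_eq_true_eq, hx, if_false]
        push_cast
        ring

theorem zadLoopB_append (l1 l2 : List Int) : ∀ st : Int × Int,
    zadLoopB (l1 ++ l2) st = zadLoopB l2 (zadLoopB l1 st) := by
  induction l1 with
  | nil => intro st; simp [zadLoopB]
  | cons x r ih =>
      intro st
      obtain ⟨t, z⟩ := st
      by_cases hx : x = 0
      · subst hx; simp [zadLoopB, ih]
      · simp [zadLoopB, if_neg hx, ih]

theorem zadLoopB_reverse (tab : List Int) :
    zadLoopB tab.reverse (0, 0) = (2 * invJ tab, czCount tab) := by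
  induction tab with
  | nil => simp [zadLoopB, invJ, czCount]
  | cons x r ih =>
      rw [List.reverse_cons, zadLoopB_append, ih]
      by_cases hx : x = 0
      · subst hx
        simp [zadLoopB, invJ, czCount]
      · simp [zadLoopB, invJ, czCount, hx]
        ring

-- ===== VERDICT (by name: the statement is the Claim_ definition above) =====
theorem zad_spec : Claim_equal_zad := by
  intro tab _
  unfold Spec_zad zad zad_alt
  rw [zadLoopA_eq, zadLoopB_reverse]
  ring
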